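-- pv_equiv track=rewrite | github.com/azhewozhijiehaojiahuo/web | app.py | validate_solution_strict
-- ===== SOURCE A (Python) =====
-- import itertools
--
-- def validate_solution_strict(n_elements, k, j, s, solution):
--     """严格验证解决方案"""
--     required_groups = list(itertools.combinations(n_elements, j))
--     solution_sets = [set(group) for group in solution]
--
--     for group in required_groups:
--         group_subsets = list(itertools.combinations(group, s))
--         covered = False
--         for subset in group_subsets:
--             subset_set = set(subset)
--             for sol in solution_sets:
--                 if subset_set.issubset(sol):
--                     covered = True
--                     break
--             if covered:
--                 break
--         if not covered:
--             return False
--     return True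
-- ===== SOURCE B (Python) =====
-- def validate_solution_strict(n_elements, k, j, s, solution):
--     """Strict validation by a take/skip recursion over the element list that
--     carries per-solution overlap counts; no s-subset enumeration and no
--     materialized list of j-groups."""
--     solution_sets = [set(g) for g in solution]
--
--     def ok(xs, r, counts):
--         # ok <=> every j-group picking exactly r more elements from xs is covered
--         if r == 0:
--             return any(c >= s for c in counts)
--         if len(xs) < r:
--             return True
--         x = xs[0]
--         rest = xs[1:]
--         bumped = [c + (1 if x in sol else 0) for c, sol in zip(counts, solution_sets)]
--         return ok(rest, r - 1, bumped) and ok(rest, r, counts)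
--
--     return ok(list(n_elements), j, [0] * len(solution_sets))
-- ===== Notes on version B (the rewrite author's own statement) =====
-- stated objective: alternative
-- what changed: B replaces A's materialized enumeration of all j-groups and all their s-subsets (checked by set inclusion) with a take/skip recursion over the element list that carries per-solution overlap counts, deciding coverage at each completed group by a count >= s test.
import Mathlib
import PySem

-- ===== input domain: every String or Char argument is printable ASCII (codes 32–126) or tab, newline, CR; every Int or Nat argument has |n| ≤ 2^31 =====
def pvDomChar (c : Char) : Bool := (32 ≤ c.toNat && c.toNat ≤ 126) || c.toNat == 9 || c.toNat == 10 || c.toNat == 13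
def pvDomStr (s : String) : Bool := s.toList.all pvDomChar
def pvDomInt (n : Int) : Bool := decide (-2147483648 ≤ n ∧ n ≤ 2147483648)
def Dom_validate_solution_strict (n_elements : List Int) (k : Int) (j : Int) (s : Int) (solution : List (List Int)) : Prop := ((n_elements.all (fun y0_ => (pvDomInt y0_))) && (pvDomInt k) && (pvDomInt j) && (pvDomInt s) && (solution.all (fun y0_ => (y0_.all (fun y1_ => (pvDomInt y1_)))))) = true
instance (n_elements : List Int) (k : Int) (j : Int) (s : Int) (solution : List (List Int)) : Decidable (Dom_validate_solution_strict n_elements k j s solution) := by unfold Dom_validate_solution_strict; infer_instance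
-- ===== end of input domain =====

-- B replaces A's j-group/s-subset enumeration by a take/skip recursion carrying per-solution overlap counts (return-value equivalence on Pre_).


-- itertools.combinations(xs, r): all r-element combinations, positional, lexicographic by position
def pyCombos (r : Nat) (xs : List Int) : List (List Int) :=
  match r, xs with
  | 0, _ => [[]]
  | _+1, [] => []
  | r+1, x :: xs => (pyCombos r xs).map (fun t => x :: t) ++ pyCombos (r+1) xs

-- ===== PORT A =====
def validate_solution_strict (n_elements : List Int) (k : Int) (j : Int) (s : Int) (solution : List (List Int)) : Bool :=
  let required_groups := pyCombos j.toNat n_elements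
  let solution_sets := solution.map (fun group => PySem.Set.ofList group)
  -- for group … : flag 'covered' with breaks = any over subsets, any over solution sets
  required_groups.all (fun group =>
    (pyCombos s.toNat group).any (fun subset =>
      solution_sets.any (fun sol => PySem.Set.issubset (PySem.Set.ofList subset) sol)))

-- ===== PORT B =====
-- ok(xs, r, counts): every group taking r more elements from xs is covered
def okB (s : Int) (sets : List (PySem.Set Int)) (xs : List Int) (r : Nat) (counts : List Int) : Bool :=
  match r with
  | 0 => counts.any (fun c => decide (s ≤ c))
  | r'+1 =>
    if xs.length < r'+1 then true
    else
      match xs with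
      | [] => true  -- unreachable: the length guard above already returned
      | x :: rest =>
        let bumped := (counts.zip sets).map (fun p => p.1 + (if p.2.contains x then 1 else 0))
        okB s sets rest r' bumped && okB s sets rest (r'+1) counts

def validate_solution_strict_alt (n_elements : List Int) (k : Int) (j : Int) (s : Int) (solution : List (List Int)) : Bool :=
  let solution_sets := solution.map (fun g => PySem.Set.ofList g)
  okB s solution_sets n_elements j.toNat (List.replicate solution_sets.length 0)

-- ===== PRECONDITION & SPEC =====
-- A raises ValueError (itertools.combinations with negative r) when j < 0, or when s < 0 and at least one j-group exists.
def Pre_validate_solution_strict (n_elements : List Int) (k : Int) (j : Int) (s : Int) (solution : List (List Int)) : Prop :=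
  0 ≤ j ∧ (0 ≤ s ∨ (n_elements.length : Int) < j)
instance (n_elements : List Int) (k : Int) (j : Int) (s : Int) (solution : List (List Int)) : Decidable (Pre_validate_solution_strict n_elements k j s solution) := by unfold Pre_validate_solution_strict; infer_instance
def pvWitness_validate_solution_strict : List Int × Int × Int × Int × List (List Int) := ([1, 2, 3], 2, 2, 1, [[1, 2]])

def Spec_validate_solution_strict (n_elements : List Int) (k : Int) (j : Int) (s : Int) (solution : List (List Int)) (out : Bool) : Prop := out = validate_solution_strict_alt n_elements k j s solution
instance (n_elements : List Int) (k : Int) (j : Int) (s : Int) (solution : List (List Int)) (out : Bool) : Decidable (Spec_validate_solution_strict n_elements k j s solution out) := by unfold Spec_validate_solution_strict; infer_instance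

-- ===== CLAIM (what is proved, stated in full; the proofs are below) =====
def Claim_equal_validate_solution_strict : Prop := ∀ (n_elements : List Int) (k : Int) (j : Int) (s : Int) (solution : List (List Int)), Dom_validate_solution_strict n_elements k j s solution → Pre_validate_solution_strict n_elements k j s solution → Spec_validate_solution_strict n_elements k j s solution (validate_solution_strict n_elements k j s solution)

-- ===== LEMMAS AND PROOFS =====

-- any s-subset of g satisfies p pointwise  ⟺  g has at least r entries satisfying p
theorem combos_any_all (r : Nat) (g : List Int) (p : Int → Bool) :
    (pyCombos r g).any (fun sub => sub.all p) = decide (r ≤ (g.filter p).length) := by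
  induction g generalizing r with
  | nil => cases r <;> simp [pyCombos]
  | cons x xs ih =>
    cases r with
    | zero => simp [pyCombos]
    | succ r =>
      rw [Bool.eq_iff_iff]
      cases hp : p x <;>
        simp [pyCombos, List.any_append, List.any_map, Function.comp_def, hp, ih] <;> omega

theorem all_congr' {a : Type} (l : List a) (p q : a → Bool) (h : ∀ x, x ∈ l → p x = q x) :
    l.all p = l.all q := by
  induction l with
  | nil => rfl
  | cons y ys ih => simp_all

theorem any_congr' {a : Type} (l : List a) (p q : a → Bool) (h : ∀ x, x ∈ l → p x = q x) :
    l.any p = l.any q := by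
  induction l with
  | nil => rfl
  | cons y ys ih => simp_all

theorem any_any_comm {α β : Type} (xs : List α) (ys : List β) (f : α → β → Bool) :
    (xs.any fun a => ys.any fun b => f a b) = (ys.any fun b => xs.any fun a => f a b) := by
  rw [Bool.eq_iff_iff]
  simp only [List.any_eq_true]
  tauto

theorem issubset_ofList (sub : List Int) (sol : PySem.Set Int) :
    PySem.Set.issubset (PySem.Set.ofList sub) sol = sub.all (fun x => PySem.Set.contains sol x) := by
  rw [Bool.eq_iff_iff]
  simp [PySem.Set.issubset_iff, List.all_eq_true, PySem.Set.mem_ofList]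

-- A's inner double loop for one group and one solution set equals a count test
theorem inner_eq (s : Int) (group : List Int) (sol : PySem.Set Int) :
    (pyCombos s.toNat group).any (fun subset => PySem.Set.issubset (PySem.Set.ofList subset) sol)
      = decide (s ≤ ((group.filter (fun x => PySem.Set.contains sol x)).length : Int)) := by
  simp only [issubset_ofList]
  rw [combos_any_all, Bool.eq_iff_iff]
  simp [Int.toNat_le]

theorem pyCombos_nil_of_lt (r : Nat) (xs : List Int) (h : xs.length < r) : pyCombos r xs = [] := by
  induction xs generalizing r with
  | nil => cases r with
    | zero => omega
    | succ r => rfl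
  | cons x rest ih =>
    cases r with
    | zero => omega
    | succ r =>
      simp at h
      simp [pyCombos, ih r (by omega), ih (r+1) (by omega)]

theorem zip_map_fst (x : Int) (counts : List Int) (sets : List (PySem.Set Int))
    (h : counts.length = sets.length) :
    ((counts.zip sets).map fun p => p.1 + (if p.2.contains x then 1 else 0)).zip sets
      = (counts.zip sets).map fun p => (p.1 + (if p.2.contains x then 1 else 0), p.2) := by
  induction counts generalizing sets with
  | nil => simp
  | cons c cs ih =>
    cases sets with
    | nil => simp at h
    | cons t ts => simp_all

theorem zip_any_fst (counts : List Int) (sets : List (PySem.Set Int))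
    (f : Int → Bool) (h : counts.length = sets.length) :
    (counts.zip sets).any (fun p => f p.1) = counts.any f := by
  induction counts generalizing sets with
  | nil => simp
  | cons c cs ih =>
    cases sets with
    | nil => simp at h
    | cons t ts => simp_all

-- invariant: okB decides that every r-combination from xs, counted on top of `counts`, is covered
theorem okB_eq (s : Int) (sets : List (PySem.Set Int)) (xs : List Int) (r : Nat)
    (counts : List Int) (h : counts.length = sets.length) :
    okB s sets xs r counts
      = (pyCombos r xs).all (fun g => (counts.zip sets).any (fun p =>
          decide (s ≤ p.1 + ((g.filter (fun x => p.2.contains x)).length : Int)))) := by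
  induction xs generalizing r counts with
  | nil =>
    cases r with
    | zero =>
      simp only [okB, pyCombos, List.all_cons, List.all_nil, List.filter_nil,
        List.length_nil, Int.natCast_zero, Int.add_zero, Bool.and_true]
      exact (zip_any_fst counts sets _ h).symm
    | succ r => simp [okB, pyCombos]
  | cons x rest ih =>
    cases r with
    | zero =>
      simp only [okB, pyCombos, List.all_cons, List.all_nil, List.filter_nil,
        List.length_nil, Int.natCast_zero, Int.add_zero, Bool.and_true]
      exact (zip_any_fst counts sets _ h).symm
    | succ r =>
      by_cases hl : (x :: rest).length < r + 1
      · rw [pyCombos_nil_of_lt _ _ hl]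
        simp only [okB, if_pos hl, List.all_nil]
      · have hb : ((counts.zip sets).map (fun p => p.1 + (if p.2.contains x then 1 else 0))).length = sets.length := by
          simp [List.length_zip, h]
        simp only [okB, if_neg hl]
        rw [ih r _ hb, ih (r+1) counts h]
        simp only [pyCombos, List.all_append, List.all_map, Function.comp_def]
        congr 1
        refine all_congr' _ _ _ (fun g _ => ?_)
        rw [zip_map_fst x counts sets h, List.any_map]
        refine any_congr' _ _ _ (fun p _ => ?_)
        rw [Bool.eq_iff_iff]
        by_cases hp : x ∈ p.2 <;>
          simp [List.filter_cons, PySem.Set.contains_iff, hp] <;> push_cast <;> omega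

theorem replicate_zip (sets : List (PySem.Set Int)) :
    (List.replicate sets.length (0 : Int)).zip sets = sets.map (fun t => ((0 : Int), t)) := by
  induction sets with
  | nil => rfl
  | cons t ts ih => simp [List.replicate, ih]

-- ===== VERDICT (by name: the statement is the Claim_ definition above) =====
theorem validate_solution_strict_spec : Claim_equal_validate_solution_strict := by
  intro n_elements k j s solution _ _
  unfold Spec_validate_solution_strict validate_solution_strict validate_solution_strict_alt
  rw [okB_eq _ _ _ _ _ (by simp), replicate_zip]
  refine all_congr' _ _ _ (fun group _ => ?_)
  rw [any_any_comm]
  simp only [List.map_map, List.any_map, Function.comp_def]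
  refine any_congr' _ _ _ (fun sol _ => ?_)
  rw [inner_eq s group (PySem.Set.ofList sol)]
  simp
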